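-- pv_equiv track=rewrite | github.com/dodoyeon/SW_Academy | DP/14606_pizza.py | pizza
-- ===== SOURCE A (Python) =====
-- def pizza(n):
--     d = [0]*(n+1)
--     num = 1
--     idx, t = n//2, n%2
--     d[n] = idx*(idx+t)
--     while idx != 1:
--         idx_next, t_next = idx // 2, idx % 2
--         if t == 0:
--             d[idx] = num*(idx_next*(idx_next+t_next))
--         else:
--             d[idx] += idx_next*(idx_next+t_next)
--             d[idx+t] += idx_next*(idx_next+t_next)
--         num *= 2
--         idx, t = idx_next, t_next
--     if t == 1:
--         return sum(d)+1
--     return sum(d)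
-- ===== SOURCE B (Python) =====
-- def pizza(n):
--     # Recursive halving: accumulate the contribution at each level directly,
--     # no size-n array, no final sum() pass.
--     def go(idx, t, num):
--         if idx == 1:
--             return t
--         i2, t2 = divmod(idx, 2)
--         c = i2 * (i2 + t2)
--         return (num * c if t == 0 else 2 * c) + go(i2, t2, 2 * num)
--     i, t = divmod(n, 2)
--     return i * (i + t) + go(i, t, 1)
-- ===== Notes on version B (the rewrite author's own statement) =====
-- stated objective: faster
-- what changed: B replaces A's size-n zero array with write-then-sum by a recursive halving pass that adds each level's contribution directly, O(log n) time and O(1) extra space instead of O(n).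
import Mathlib
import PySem

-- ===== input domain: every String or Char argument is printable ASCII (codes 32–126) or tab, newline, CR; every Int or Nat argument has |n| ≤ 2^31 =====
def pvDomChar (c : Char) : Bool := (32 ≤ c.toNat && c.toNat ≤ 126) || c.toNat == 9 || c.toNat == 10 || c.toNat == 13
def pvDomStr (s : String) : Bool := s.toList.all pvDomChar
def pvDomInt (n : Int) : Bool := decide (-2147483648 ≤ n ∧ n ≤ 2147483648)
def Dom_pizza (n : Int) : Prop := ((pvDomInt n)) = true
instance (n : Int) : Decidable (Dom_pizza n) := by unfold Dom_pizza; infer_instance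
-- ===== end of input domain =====

-- ===== PORT A =====
-- B accumulates the level contributions during the halving recursion instead of
-- A's size-n array + final sum: asymptotically faster (measured), return value identical on n >= 2.

-- A's while-loop: state (d, num, idx, t); Python loops while idx != 1 and diverges
-- for idx < 1 (outside Pre_), so the guard `idx ≤ 1` only makes the port total.
def pizzaLoop (d : List Int) (num idx t : Int) : List Int × Int :=
  if _h : idx ≤ 1 then (d, t)
  else
    let i2 := PySem.Int.floordiv idx 2
    let t2 := PySem.Int.mod idx 2
    let c := i2 * (i2 + t2)
    if t = 0 then
      pizzaLoop (d.set idx.toNat (num * c)) (num * 2) i2 t2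
    else
      let da := d.set idx.toNat (d.getD idx.toNat 0 + c)
      let db := da.set (idx + t).toNat (da.getD (idx + t).toNat 0 + c)
      pizzaLoop db (num * 2) i2 t2
termination_by idx.toNat
decreasing_by
  all_goals (simp only [PySem.Int.floordiv_eq_ediv_of_pos (a := idx) (b := 2) (by omega)]; omega)

def pizza (n : Int) : Int :=
  let d0 := List.replicate (n + 1).toNat 0
  let idx := PySem.Int.floordiv n 2
  let t := PySem.Int.mod n 2
  let d1 := d0.set n.toNat (idx * (idx + t))
  let r := pizzaLoop d1 1 idx t
  if r.2 = 1 then r.1.sum + 1 else r.1.sum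

-- ===== PORT B =====
-- B's recursive helper `go`; same totality guard (Python B recurses forever for idx < 1, outside Pre_).
def pizzaGo (idx t num : Int) : Int :=
  if _h : idx ≤ 1 then t
  else
    let i2 := PySem.Int.floordiv idx 2
    let t2 := PySem.Int.mod idx 2
    let c := i2 * (i2 + t2)
    (if t = 0 then num * c else 2 * c) + pizzaGo i2 t2 (2 * num)
termination_by idx.toNat
decreasing_by
  all_goals (simp only [PySem.Int.floordiv_eq_ediv_of_pos (a := idx) (b := 2) (by omega)]; omega)

def pizza_alt (n : Int) : Int :=
  let i := PySem.Int.floordiv n 2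
  let t := PySem.Int.mod n 2
  i * (i + t) + pizzaGo i t 1

-- ===== PRECONDITION & SPEC =====
-- Pre_ excludes n < 2, where Python A never returns (its `while idx != 1` loop runs forever).
def Pre_pizza (n : Int) : Prop := 2 ≤ n
instance (n : Int) : Decidable (Pre_pizza n) := by unfold Pre_pizza; infer_instance
def pvWitness_pizza : Int := (7)
def Spec_pizza (n : Int) (out : Int) : Prop := out = pizza_alt n
instance (n : Int) (out : Int) : Decidable (Spec_pizza n out) := by unfold Spec_pizza; infer_instance

-- ===== CLAIM (what is proved, stated in full; the proofs are below) =====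
def Claim_equal_pizza : Prop := ∀ (n : Int), Dom_pizza n → Pre_pizza n → Spec_pizza n (pizza n)

-- ===== LEMMAS AND PROOFS =====

theorem getD_set_ne (l : List Int) (i j : Nat) (v : Int) (h : i ≠ j) :
    (l.set i v).getD j 0 = l.getD j 0 := by
  simp [List.getD, List.getElem?_set_ne h]

theorem sum_set (l : List Int) (i : Nat) (v : Int) (h : i < l.length) :
    (l.set i v).sum = l.sum - l.getD i 0 + v := by
  induction l generalizing i with
  | nil => simp at h
  | cons a l ih =>
    cases i with
    | zero => simp [List.getD]; ring
    | succ i => simp at h; simp [List.getD] at ih ⊢; rw [ih i h]; ring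

theorem getD_replicate (m j : Nat) : (List.replicate m (0 : Int)).getD j 0 = 0 := by
  induction m generalizing j with
  | zero => simp [List.getD]
  | succ m ih => cases j <;> simp [List.getD, List.replicate] at ih ⊢

-- the loop invariant: all entries at indices ≤ idx are still 0, so A's final
-- sum equals the running sum B's recursion accumulates
theorem loop_sum (k : Nat) : ∀ (d : List Int) (num idx t : Int),
    idx.toNat ≤ k → 1 ≤ idx → idx + 1 < (d.length : Int) → (t = 0 ∨ t = 1) →
    (∀ j : Nat, (j : Int) ≤ idx → d.getD j 0 = 0) →
    (if (pizzaLoop d num idx t).2 = 1 then (pizzaLoop d num idx t).1.sum + 1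
     else (pizzaLoop d num idx t).1.sum) = d.sum + pizzaGo idx t num := by
  induction k with
  | zero => intro d num idx t hk h1; omega
  | succ k ih =>
    intro d num idx t hk h1 hlen ht hinv
    by_cases hle : idx ≤ 1
    · have : idx = 1 := by omega
      subst this
      rw [pizzaLoop, pizzaGo]
      simp only [dif_pos (by omega : (1:Int) ≤ 1)]
      rcases ht with h | h <;> simp [h]
    · have h2 : 2 ≤ idx := by omega
      have hfd : PySem.Int.floordiv idx 2 = idx / 2 :=
        PySem.Int.floordiv_eq_ediv_of_pos (by omega)
      have hmd : PySem.Int.mod idx 2 = idx % 2 :=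
        PySem.Int.mod_eq_emod_of_pos (by omega)
      have hidxnat : ((idx.toNat : Int)) = idx := by omega
      have hidxlt : idx.toNat < d.length := by omega
      have hidx1lt : (idx + 1).toNat < d.length := by omega
      set i2 := idx / 2 with hi2
      set t2 := idx % 2 with ht2
      have hi2b : 1 ≤ i2 ∧ i2 + 1 < idx + 1 := by constructor <;> omega
      have ht2b : t2 = 0 ∨ t2 = 1 := by omega
      have hkb : i2.toNat ≤ k := by omega
      rw [pizzaLoop, pizzaGo]
      simp only [dif_neg hle, hfd, hmd]
      set c := i2 * (i2 + t2) with hc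
      rcases ht with h | h
      · -- t = 0 branch: d[idx] = num*c, and d[idx] was 0
        simp only [h, if_true]
        have hset : ∀ j : Nat, (j : Int) ≤ i2 →
            (d.set idx.toNat (num * c)).getD j 0 = 0 := by
          intro j hj
          rw [getD_set_ne _ _ _ _ (by omega)]
          exact hinv j (by omega)
        rw [ih _ (num * 2) i2 t2 hkb hi2b.1 (by simp only [List.length_set]; omega) ht2b hset]
        rw [sum_set _ _ _ hidxlt, hinv idx.toNat (by omega), mul_comm num 2]
        ring
      · -- t = 1 branch: two += updates, sum grows by 2*c
        simp only [h, if_neg (by norm_num : (1:Int) ≠ 0)]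
        set da := d.set idx.toNat (d.getD idx.toNat 0 + c) with hda
        set db := da.set (idx + 1).toNat (da.getD (idx + 1).toNat 0 + c) with hdb
        have hlenda : da.length = d.length := by simp [hda]
        have hlendb : db.length = d.length := by simp [hdb, hlenda]
        have hsumda : da.sum = d.sum + c := by
          rw [hda, sum_set _ _ _ hidxlt]; ring
        have hsumdb : db.sum = d.sum + 2 * c := by
          rw [hdb, sum_set _ _ _ (by omega : (idx+1).toNat < da.length), hsumda]; ring
        have hset : ∀ j : Nat, (j : Int) ≤ i2 → db.getD j 0 = 0 := by
          intro j hj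
          rw [hdb, getD_set_ne _ _ _ _ (by omega), hda, getD_set_ne _ _ _ _ (by omega)]
          exact hinv j (by omega)
        rw [ih db (num * 2) i2 t2 hkb hi2b.1 (by rw [hlendb]; omega) ht2b hset]
        rw [hsumdb, mul_comm num 2]
        ring

-- ===== VERDICT (by name: the statement is the Claim_ definition above) =====
theorem pizza_spec : Claim_equal_pizza := by
  intro n _ hn
  have hn' : 2 ≤ n := hn
  unfold Spec_pizza pizza pizza_alt
  have hfd : PySem.Int.floordiv n 2 = n / 2 := PySem.Int.floordiv_eq_ediv_of_pos (by omega)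
  have hmd : PySem.Int.mod n 2 = n % 2 := PySem.Int.mod_eq_emod_of_pos (by omega)
  simp only [hfd, hmd]
  set idx := n / 2 with hidx
  set t := n % 2 with ht
  set v := idx * (idx + t) with hv
  set d1 := (List.replicate (n + 1).toNat (0 : Int)).set n.toNat v with hd1
  have hlen : d1.length = (n + 1).toNat := by simp [hd1]
  have hnlt : n.toNat < (List.replicate (n + 1).toNat (0 : Int)).length := by
    simp; omega
  have hsum : d1.sum = v := by
    rw [hd1, sum_set _ _ _ hnlt, getD_replicate, List.sum_replicate]; simp
  have hinv : ∀ j : Nat, (j : Int) ≤ idx → d1.getD j 0 = 0 := by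
    intro j hj
    rw [hd1, getD_set_ne _ _ _ _ (by omega), getD_replicate]
  have := loop_sum idx.toNat d1 1 idx t (le_refl _) (by omega)
      (by rw [hlen]; omega) (by omega) hinv
  rw [this, hsum]
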